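-- pv_equiv track=rewrite | github.com/amcgail/nytimes-obituaries | attributes/name_strang.py | addspaceafterperiod
-- ===== SOURCE A (Python) =====
-- def addspaceafterperiod(astring):
--     if astring == '':
--         return ''
--     else:
--         alist = []
--         for i, char in enumerate(astring):
--             if i < len(astring) - 1:
--                 if char == '.' and astring[i+1] != ' ':
--                     alist.append('. ')
--                 else:
--                     alist.append(char)
--         alist.append(astring[len(astring)-1])
--         return ''.join(alist)
-- ===== SOURCE B (Python) =====
-- def addspaceafterperiod(astring):
--     out = ''
--     for char in reversed(astring):
--         if char == '.' and out and out[0] != ' ':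
--             out = '. ' + out
--         else:
--             out = char + out
--     return out
-- ===== Notes on version B (the rewrite author's own statement) =====
-- stated objective: alternative
-- what changed: B builds the result right-to-left with a single accumulator, deciding each period from the head of the already-built suffix, instead of A's indexed left-to-right scan with a lookahead astring[i+1] and a separate last-character append.
import Mathlib
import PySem

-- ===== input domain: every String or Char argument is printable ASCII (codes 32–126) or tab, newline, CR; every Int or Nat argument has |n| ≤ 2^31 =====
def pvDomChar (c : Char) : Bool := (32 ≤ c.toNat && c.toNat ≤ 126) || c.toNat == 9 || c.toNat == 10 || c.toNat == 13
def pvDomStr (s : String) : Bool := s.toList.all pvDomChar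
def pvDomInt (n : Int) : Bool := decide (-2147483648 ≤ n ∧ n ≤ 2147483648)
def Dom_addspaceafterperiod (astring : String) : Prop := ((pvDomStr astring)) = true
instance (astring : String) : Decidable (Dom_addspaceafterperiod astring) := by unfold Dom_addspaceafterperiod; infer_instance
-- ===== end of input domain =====

-- B builds the output right-to-left from a single accumulator instead of A's indexed
-- left-to-right scan with lookahead; same return value on every input (alternative, not faster).

-- ===== PORT A =====
-- literal port of A: loop over enumerate(astring); for i < len-1 append '. ' (as two chars)
-- when char is '.' and astring[i+1] != ' ', else the char; afterwards append the last char
def addspaceafterperiod (astring : String) : String :=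
  if astring = "" then "" else
    let cs := astring.toList
    let alist := (PySem.List.enumerate cs).foldl (fun acc p =>
      if p.1 < (cs.length : Int) - 1 then
        if p.2 = '.' ∧ PySem.List.pyGet? cs (p.1 + 1) ≠ some ' ' then acc ++ ['.', ' ']
        else acc ++ [p.2]
      else acc) []
    String.ofList (alist ++ [cs.getD (cs.length - 1) ' '])

-- ===== PORT B =====
-- right-to-left accumulator loop of Source B, as structural recursion on the reversed traversal
def goAlt : List Char → List Char
  | [] => []
  | c :: rest =>
    let out := goAlt rest
    if c = '.' ∧ out ≠ [] ∧ out.headD ' ' ≠ ' ' then '.' :: ' ' :: out else c :: out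

def addspaceafterperiod_alt (astring : String) : String :=
  String.ofList (goAlt astring.toList)

-- ===== PRECONDITION & SPEC =====
def Spec_addspaceafterperiod (astring : String) (out : String) : Prop := out = addspaceafterperiod_alt astring
instance (astring : String) (out : String) : Decidable (Spec_addspaceafterperiod astring out) := by unfold Spec_addspaceafterperiod; infer_instance

-- ===== CLAIM (what is proved, stated in full; the proofs are below) =====
def Claim_equal_addspaceafterperiod : Prop := ∀ (astring : String), Dom_addspaceafterperiod astring → Spec_addspaceafterperiod astring (addspaceafterperiod astring)

-- ===== LEMMAS AND PROOFS =====

-- head of B's accumulator is always the character just processed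
theorem goAlt_cons_head (c : Char) (t : List Char) :
    ∃ u, goAlt (c :: t) = c :: u := by
  simp only [goAlt]
  split_ifs with h
  · exact ⟨' ' :: goAlt t, by rw [h.1]⟩
  · exact ⟨goAlt t, rfl⟩

-- the per-character emission of A's loop body, as a function of the pair (cur, next)
def stepA (a b : Char) : List Char :=
  if a = '.' ∧ b ≠ ' ' then ['.', ' '] else [a]

-- A's loop emission on a nonempty list, as a recursion on adjacent pairs (without the final char)
def bodyA : List Char → List Char
  | [] => []
  | [_] => []
  | a :: b :: t => stepA a b ++ bodyA (b :: t)

-- the body of A's loop, with the no-op branch written as appending []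
def emitA (cs : List Char) (p : Int × Char) : List Char :=
  if p.1 < (cs.length : Int) - 1 then
    if p.2 = '.' ∧ PySem.List.pyGet? cs (p.1 + 1) ≠ some ' ' then ['.', ' ']
    else [p.2]
  else []

theorem flatMap_enumerate_shift {α β : Type} (l : List α) (s : Int) (f : Int × α → List β) :
    List.flatMap f (PySem.List.enumerate l (s + 1))
      = List.flatMap (fun p => f (p.1 + 1, p.2)) (PySem.List.enumerate l s) := by
  induction l generalizing s with
  | nil => simp [PySem.List.enumerate_nil]
  | cons x xs ih =>
    simp only [PySem.List.enumerate_cons, List.flatMap_cons]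
    rw [ih (s + 1)]

theorem flatMap_emitA (a b : Char) (u : List Char) :
    List.flatMap (emitA (a :: b :: u)) (PySem.List.enumerate (a :: b :: u) 0)
      = stepA a b ++ List.flatMap (emitA (b :: u)) (PySem.List.enumerate (b :: u) 0) := by
  rw [PySem.List.enumerate_cons, List.flatMap_cons,
    show (0 : Int) + 1 = 0 + 1 from rfl, flatMap_enumerate_shift (b :: u) 0 (emitA (a :: b :: u))]
  have hcong : ∀ p ∈ PySem.List.enumerate (b :: u) 0,
      emitA (a :: b :: u) (p.1 + 1, p.2) = emitA (b :: u) p := by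
    intro p hp
    obtain ⟨k, hk, rfl⟩ := (PySem.List.mem_enumerate_iff (b :: u) 0 p).1 hp
    simp only [emitA, List.length_cons]
    have hget : PySem.List.pyGet? (a :: b :: u) (0 + (k : Int) + 1 + 1)
        = PySem.List.pyGet? (b :: u) (0 + (k : Int) + 1) := by
      rw [show (0 + (k : Int) + 1 + 1) = ((k + 1 : Nat) : Int) + 1 by push_cast; ring,
        PySem.List.pyGet?_cons_succ,
        show ((k + 1 : Nat) : Int) = 0 + (k : Int) + 1 by push_cast; ring]
    have hiff : 0 + (k : Int) + 1 < ((u.length + 1 + 1 : Nat) : Int) - 1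
        ↔ 0 + (k : Int) < ((u.length + 1 : Nat) : Int) - 1 := by push_cast; omega
    rw [hget, if_congr hiff rfl rfl]
  rw [List.flatMap_congr hcong]
  congr 1
  have hlt : (0 : Int) < ((a :: b :: u).length : Int) - 1 := by
    simp only [List.length_cons]; push_cast; omega
  have hget : PySem.List.pyGet? (a :: b :: u) ((0 : Int) + 1) = some b := by
    rw [show ((0 : Int) + 1) = ((0 : Nat) : Int) + 1 by norm_num, PySem.List.pyGet?_cons_succ]
    simp
  show emitA (a :: b :: u) (0, a) = stepA a b
  simp only [emitA, stepA, hget, if_pos hlt]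
  by_cases h : a = '.' ∧ b ≠ ' ' <;> simp [h]

theorem flatMap_emitA_all (cs : List Char) :
    List.flatMap (emitA cs) (PySem.List.enumerate cs 0) = bodyA cs := by
  induction cs with
  | nil => simp [bodyA, PySem.List.enumerate_nil]
  | cons a t ih =>
    cases t with
    | nil => simp [bodyA, emitA, PySem.List.enumerate_cons, PySem.List.enumerate_nil]
    | cons b u =>
      rw [flatMap_emitA, ih]
      rfl

-- A's foldl over enumerate equals bodyA
theorem foldA_eq_bodyA (cs : List Char) :
    (PySem.List.enumerate cs).foldl (fun acc p =>
      if p.1 < (cs.length : Int) - 1 then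
        if p.2 = '.' ∧ PySem.List.pyGet? cs (p.1 + 1) ≠ some ' ' then acc ++ ['.', ' ']
        else acc ++ [p.2]
      else acc) [] = bodyA cs := by
  have hfun : (fun (acc : List Char) (p : Int × Char) =>
      if p.1 < (cs.length : Int) - 1 then
        if p.2 = '.' ∧ PySem.List.pyGet? cs (p.1 + 1) ≠ some ' ' then acc ++ ['.', ' ']
        else acc ++ [p.2]
      else acc) = (fun acc p => acc ++ emitA cs p) := by
    funext acc p
    simp only [emitA]
    split_ifs <;> simp
  rw [hfun, PySem.List.foldl_append_eq_flatMap, List.nil_append]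
  exact flatMap_emitA_all cs

-- bodyA plus the last character equals B's right-to-left construction
theorem bodyA_last_eq_goAlt (c : Char) (t : List Char) :
    bodyA (c :: t) ++ [(c :: t).getD ((c :: t).length - 1) ' '] = goAlt (c :: t) := by
  induction t generalizing c with
  | nil => simp [bodyA, goAlt]
  | cons b u ih =>
    obtain ⟨v, hv⟩ := goAlt_cons_head b u
    have hlast : (c :: b :: u).getD ((c :: b :: u).length - 1) ' '
        = (b :: u).getD ((b :: u).length - 1) ' ' := by
      rw [show (c :: b :: u).length - 1 = u.length + 1 by simp, List.getD_cons_succ,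
        show (b :: u).length - 1 = u.length by simp]
    rw [show bodyA (c :: b :: u) = stepA c b ++ bodyA (b :: u) from rfl, hlast,
      List.append_assoc, ih b]
    have hexp : goAlt (c :: b :: u)
        = if c = '.' ∧ goAlt (b :: u) ≠ [] ∧ (goAlt (b :: u)).headD ' ' ≠ ' '
          then '.' :: ' ' :: goAlt (b :: u) else c :: goAlt (b :: u) := rfl
    rw [hexp, hv]
    by_cases hc : c = '.' ∧ b ≠ ' '
    · rw [stepA, if_pos hc, if_pos ⟨hc.1, by simp, by show b ≠ ' '; exact hc.2⟩]
      simp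
    · rw [stepA, if_neg hc, if_neg ?_]
      · simp
      · rintro ⟨h1, _, h3⟩
        exact hc ⟨h1, h3⟩

-- ===== VERDICT (by name: the statement is the Claim_ definition above) =====
theorem addspaceafterperiod_spec : Claim_equal_addspaceafterperiod := by
  intro astring _
  show addspaceafterperiod astring = addspaceafterperiod_alt astring
  unfold addspaceafterperiod addspaceafterperiod_alt
  by_cases h : astring = ""
  · subst h; rfl
  · rw [if_neg h]
    have hne : astring.toList ≠ [] := by
      intro hnil
      exact h (String.toList_inj.mp (by rw [hnil]; rfl))
    obtain ⟨c, t, hct⟩ := List.exists_cons_of_ne_nil hne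
    simp only [hct]
    rw [foldA_eq_bodyA, bodyA_last_eq_goAlt]
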